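-- pv_equiv track=rewrite | github.com/sundjerbob/WebScraper | corner.py | is_betting_odds
-- ===== SOURCE A (Python) =====
-- def is_betting_odds(string):
--     string.strip()
--
--     if len(string) == 4 or len(string) == 3:
--
--         for i in range(0, len(string)):
--
--             if string[i] in {'0', '1', '2', '3', '4', '5', '6', '7', '8', '9', '.'}:
--                 continue
--
--             return False
--
--         return True
--
--     return False
-- ===== SOURCE B (Python) =====
-- import re
--
-- def is_betting_odds(string):
--     string.strip()
--     return bool(re.fullmatch(r'[0-9.]{3,4}', string))
-- ===== Notes on version B (the rewrite author's own statement) =====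
-- stated objective: idiomatic
-- what changed: Replaces the explicit length test and per-character membership loop with a single compiled-regex fullmatch of [0-9.]{3,4} (keeping the no-op strip so non-str inputs fail identically).
import Mathlib
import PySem

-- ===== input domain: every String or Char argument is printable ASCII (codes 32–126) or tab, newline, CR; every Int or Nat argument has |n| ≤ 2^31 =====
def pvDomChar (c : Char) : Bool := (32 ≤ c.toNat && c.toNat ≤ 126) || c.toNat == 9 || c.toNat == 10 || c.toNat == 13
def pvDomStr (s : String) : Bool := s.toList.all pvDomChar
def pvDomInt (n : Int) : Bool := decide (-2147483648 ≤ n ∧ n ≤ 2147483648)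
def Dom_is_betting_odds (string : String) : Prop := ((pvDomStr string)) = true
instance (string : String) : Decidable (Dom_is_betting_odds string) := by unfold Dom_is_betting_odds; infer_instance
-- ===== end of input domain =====

-- B replaces A's explicit length test and per-character loop with a single regex-style
-- fullmatch of [0-9.]{3,4} (idiomatic; same True/False on every string).

-- ===== PORT A =====
-- the membership test `string[i] in {'0',…,'9','.'}`
def pvOddsCharA (c : Char) : Bool :=
  c == '0' || c == '1' || c == '2' || c == '3' || c == '4' ||
  c == '5' || c == '6' || c == '7' || c == '8' || c == '9' || c == '.'

-- the `for i in range(0, len(string))` loop with its early `return False`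
def pvOddsLoopA (cs : List Char) : Bool :=
  match cs with
  | [] => true
  | c :: rest => if pvOddsCharA c then pvOddsLoopA rest else false

def is_betting_odds (string : String) : Bool :=
  if string.toList.length == 4 || string.toList.length == 3 then
    pvOddsLoopA string.toList
  else
    false

-- ===== PORT B =====
-- fullmatch of [0-9.]{3,4}: length between 3 and 4 and every character in the class
def is_betting_odds_alt (string : String) : Bool :=
  decide (3 ≤ string.toList.length) && decide (string.toList.length ≤ 4) &&
    string.toList.all (fun c => ('0' ≤ c && c ≤ '9') || c == '.')

-- ===== PRECONDITION & SPEC =====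
def Spec_is_betting_odds (string : String) (out : Bool) : Prop := out = is_betting_odds_alt string
instance (string : String) (out : Bool) : Decidable (Spec_is_betting_odds string out) := by unfold Spec_is_betting_odds; infer_instance

-- ===== CLAIM (what is proved, stated in full; the proofs are below) =====
def Claim_equal_is_betting_odds : Prop := ∀ (string : String), Dom_is_betting_odds string → Spec_is_betting_odds string (is_betting_odds string)

-- ===== LEMMAS AND PROOFS =====
theorem pvOddsCharA_eq (c : Char) :
    pvOddsCharA c = (('0' ≤ c && c ≤ '9') || c == '.') := by
  rw [Bool.eq_iff_iff]
  simp only [pvOddsCharA, Bool.or_eq_true, Bool.and_eq_true, beq_iff_eq, decide_eq_true_eq,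
    Char.le_def, Char.ext_iff, UInt32.le_iff_toNat_le, UInt32.ext_iff]
  have h48 : ('0' : Char).val.toNat = 48 := rfl
  have h49 : ('1' : Char).val.toNat = 49 := rfl
  have h50 : ('2' : Char).val.toNat = 50 := rfl
  have h51 : ('3' : Char).val.toNat = 51 := rfl
  have h52 : ('4' : Char).val.toNat = 52 := rfl
  have h53 : ('5' : Char).val.toNat = 53 := rfl
  have h54 : ('6' : Char).val.toNat = 54 := rfl
  have h55 : ('7' : Char).val.toNat = 55 := rfl
  have h56 : ('8' : Char).val.toNat = 56 := rfl
  have h57 : ('9' : Char).val.toNat = 57 := rfl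
  have h46 : ('.' : Char).val.toNat = 46 := rfl
  omega

theorem pvOddsLoopA_eq_all (cs : List Char) :
    pvOddsLoopA cs = cs.all (fun c => ('0' ≤ c && c ≤ '9') || c == '.') := by
  induction cs with
  | nil => rfl
  | cons c rest ih =>
    simp only [pvOddsLoopA, List.all_cons, pvOddsCharA_eq c] at *
    by_cases h : (('0' ≤ c && c ≤ '9') || c == '.') = true <;> simp [h, ih]

-- ===== VERDICT (by name: the statement is the Claim_ definition above) =====
theorem is_betting_odds_spec : Claim_equal_is_betting_odds := by
  intro s _
  unfold Spec_is_betting_odds is_betting_odds is_betting_odds_alt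
  rw [pvOddsLoopA_eq_all]
  by_cases h4 : s.toList.length = 4
  · simp [h4]
  · by_cases h3 : s.toList.length = 3
    · simp [h3]
    · have a3 : ¬ 3 ≤ s.toList.length ∨ ¬ s.toList.length ≤ 4 := by omega
      rcases a3 with h | h <;> rw [String.length_toList] at h3 h4 h <;> simp [h3, h4, h]
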